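-- pv_equiv track=rewrite | github.com/WolfgangKramer/BankArchive | banking/dialog.py | _grab_financial_instrument_segments
-- ===== SOURCE A (Python) =====
-- def _grab_financial_instrument_segments(clauses):
--     retval = []
--     stack = []
--     within_financial_instrument = False
--     for clause in clauses:
--         if clause.startswith(":16R:FIN"):
--             # start of financial instrument
--             within_financial_instrument = True
--         elif clause.startswith(":16S:FIN"):
--             # end of financial instrument - move stack over to
--             # return value
--             retval.append(stack)
--             stack = []
--             within_financial_instrument = False
--         else:
--             if within_financial_instrument:
--                 stack.append(clause)
--     return retval
-- ===== SOURCE B (Python) =====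
-- def _grab_financial_instrument_segments(clauses):
--     # Phase 1: split the clause list on end markers; clauses after the last
--     # end marker (a dangling start-without-end) are naturally dropped.
--     segments = []
--     cur = []
--     for c in clauses:
--         if c.startswith(":16S:FIN"):
--             segments.append(cur)
--             cur = []
--         else:
--             cur.append(c)
--     # Phase 2: each segment contributes the non-start-marker clauses after its
--     # first start marker, or an empty group if it has no start marker.
--     def group(seg):
--         for j, x in enumerate(seg):
--             if x.startswith(":16R:FIN"):
--                 return [y for y in seg[j + 1:] if not y.startswith(":16R:FIN")]
--         return []
--     return [group(seg) for seg in segments]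
-- ===== Notes on version B (the rewrite author's own statement) =====
-- stated objective: alternative
-- what changed: Replaces A's single-pass flag-and-stack state machine by a two-phase decomposition: split the clause list on ':16S:FIN' end markers, then map each segment to the non-start clauses after its first ':16R:FIN' start marker.
import Mathlib
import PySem

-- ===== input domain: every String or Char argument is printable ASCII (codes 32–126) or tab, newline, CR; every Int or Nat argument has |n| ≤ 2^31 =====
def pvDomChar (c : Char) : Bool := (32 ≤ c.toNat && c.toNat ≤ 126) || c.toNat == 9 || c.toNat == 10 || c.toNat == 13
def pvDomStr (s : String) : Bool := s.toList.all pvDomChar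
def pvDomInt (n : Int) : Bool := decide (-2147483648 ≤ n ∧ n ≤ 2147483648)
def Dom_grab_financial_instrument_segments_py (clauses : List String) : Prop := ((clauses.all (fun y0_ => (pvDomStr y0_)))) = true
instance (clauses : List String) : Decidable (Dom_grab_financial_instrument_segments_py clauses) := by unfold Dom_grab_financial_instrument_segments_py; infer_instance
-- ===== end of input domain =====

-- B replaces A's single-pass flag-and-stack state machine by a two-phase decomposition
-- (split on end markers, then map each segment to its group); objective: alternative, same cost.

-- ===== PORT A =====
-- loop body of A's single for-loop over clauses; state = (retval, stack, within_financial_instrument)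
def pvStepA (s : List (List String) × List String × Bool) (clause : String) :
    List (List String) × List String × Bool :=
  if PySem.Str.startswith clause ":16R:FIN" then (s.1, s.2.1, true)
  else if PySem.Str.startswith clause ":16S:FIN" then (s.1 ++ [s.2.1], [], false)
  else if s.2.2 then (s.1, s.2.1 ++ [clause], s.2.2) else s

def grab_financial_instrument_segments_py (clauses : List String) : List (List String) :=
  (clauses.foldl pvStepA ([], [], false)).1

-- ===== PORT B =====
-- B's phase-1 loop body: split on end markers; state = (segments, cur)
def pvStepB (s : List (List String) × List String) (c : String) :
    List (List String) × List String :=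
  if PySem.Str.startswith c ":16S:FIN" then (s.1 ++ [s.2], []) else (s.1, s.2 ++ [c])

-- B's 'group': find the first start marker, then keep the non-start clauses after it
def pvGroup (seg : List String) : List String :=
  match seg with
  | [] => []
  | x :: xs =>
    if PySem.Str.startswith x ":16R:FIN" then
      xs.filter (fun y => !(PySem.Str.startswith y ":16R:FIN"))
    else pvGroup xs

def grab_financial_instrument_segments_py_alt (clauses : List String) : List (List String) :=
  ((clauses.foldl pvStepB ([], [])).1).map pvGroup

-- ===== PRECONDITION & SPEC =====
def Spec_grab_financial_instrument_segments_py (clauses : List String) (out : List (List String)) : Prop := out = grab_financial_instrument_segments_py_alt clauses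
instance (clauses : List String) (out : List (List String)) : Decidable (Spec_grab_financial_instrument_segments_py clauses out) := by unfold Spec_grab_financial_instrument_segments_py; infer_instance

-- ===== CLAIM (what is proved, stated in full; the proofs are below) =====
def Claim_equal_grab_financial_instrument_segments_py : Prop := ∀ (clauses : List String), Dom_grab_financial_instrument_segments_py clauses → Spec_grab_financial_instrument_segments_py clauses (grab_financial_instrument_segments_py clauses)

-- ===== LEMMAS AND PROOFS =====

-- no string starts with both markers (they differ at index 3)
theorem pv_not_both (c : String)
    (h1 : PySem.Str.startswith c ":16R:FIN" = true)
    (h2 : PySem.Str.startswith c ":16S:FIN" = true) : False := by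
  simp only [PySem.Str.startswith_eq] at h1 h2
  rw [PySem.Chars.startswith_iff] at h1 h2
  have := List.prefix_of_prefix_length_le h1 h2 (by simp)
  have heq : (":16R:FIN".toList) = (":16S:FIN".toList) :=
    this.eq_of_length (by simp)
  exact absurd heq (by decide)

-- appending a start marker does not change the group
theorem pvGroup_append_start (cur : List String) (c : String)
    (h : PySem.Str.startswith c ":16R:FIN" = true) :
    pvGroup (cur ++ [c]) = pvGroup cur := by
  have h' := h; simp at h'
  induction cur with
  | nil => simp [pvGroup, h']
  | cons x xs ih =>
    by_cases hx : PySem.Str.startswith x ":16R:FIN" = true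
    · have hx' := hx; simp at hx'
      simp [pvGroup, hx', List.filter_append, h']
    · have hx' := hx; simp at hx'
      simp only [List.cons_append, pvGroup]
      simp only [PySem.Str.startswith_eq] at *
      simp [hx', ih]

-- appending a non-start clause extends the group iff a start marker is already present
theorem pvGroup_append_other (cur : List String) (c : String)
    (h : PySem.Str.startswith c ":16R:FIN" = false) :
    pvGroup (cur ++ [c]) =
      if cur.any (fun x => PySem.Str.startswith x ":16R:FIN") then pvGroup cur ++ [c]
      else pvGroup cur := by
  have h' := h; simp at h'
  induction cur with
  | nil => simp [pvGroup, h']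
  | cons x xs ih =>
    by_cases hx : PySem.Str.startswith x ":16R:FIN" = true
    · have hx' := hx; simp at hx'
      simp [pvGroup, hx', List.filter_append, h']
    · have hx' := hx; simp at hx'
      simp only [List.cons_append, pvGroup]
      simp only [PySem.Str.startswith_eq] at *
      simp [hx', ih]

-- main loop invariant: A's state is the image of B's state under pvGroup
theorem pv_loop (cs : List String) : ∀ (segs : List (List String)) (cur : List String),
    (cs.foldl pvStepA (segs.map pvGroup, pvGroup cur,
        cur.any (fun x => PySem.Str.startswith x ":16R:FIN"))).1
      = ((cs.foldl pvStepB (segs, cur)).1).map pvGroup := by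
  induction cs with
  | nil => intro segs cur; rfl
  | cons c cs ih =>
    intro segs cur
    by_cases h1 : PySem.Str.startswith c ":16R:FIN" = true
    · have h2 : PySem.Str.startswith c ":16S:FIN" = false := by
        by_contra h; exact pv_not_both c h1 (by simpa using h)
      have h1' := h1; have h2' := h2; simp at h1' h2'
      have hstate :
          pvStepA (segs.map pvGroup, pvGroup cur,
              cur.any (fun x => PySem.Str.startswith x ":16R:FIN")) c
            = (segs.map pvGroup, pvGroup (cur ++ [c]),
              (cur ++ [c]).any (fun x => PySem.Str.startswith x ":16R:FIN")) := by
        simp [pvStepA, h1', pvGroup_append_start cur c h1, List.any_append]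
      have hB : pvStepB (segs, cur) c = (segs, cur ++ [c]) := by
        simp [pvStepB, h2']
      simp only [List.foldl_cons, hstate, hB, ih]
    · have h1'' : PySem.Str.startswith c ":16R:FIN" = false := by
        rwa [Bool.not_eq_true] at h1
      have h1' := h1''; simp at h1'
      by_cases h2 : PySem.Str.startswith c ":16S:FIN" = true
      · have h2' := h2; simp at h2'
        have hstate :
            pvStepA (segs.map pvGroup, pvGroup cur,
                cur.any (fun x => PySem.Str.startswith x ":16R:FIN")) c
              = ((segs ++ [cur]).map pvGroup, pvGroup ([] : List String),
                ([] : List String).any (fun x => PySem.Str.startswith x ":16R:FIN")) := by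
          simp [pvStepA, h1', h2', pvGroup]
        have hB : pvStepB (segs, cur) c = (segs ++ [cur], []) := by
          simp [pvStepB, h2']
        simp only [List.foldl_cons, hstate, hB, ih]
      · have h2'' : PySem.Str.startswith c ":16S:FIN" = false := by
          rwa [Bool.not_eq_true] at h2
        have h2' := h2''; simp at h2'
        have hstate :
            pvStepA (segs.map pvGroup, pvGroup cur,
                cur.any (fun x => PySem.Str.startswith x ":16R:FIN")) c
              = (segs.map pvGroup, pvGroup (cur ++ [c]),
                (cur ++ [c]).any (fun x => PySem.Str.startswith x ":16R:FIN")) := by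
          rw [pvGroup_append_other cur c h1'']
          simp only [pvStepA, List.any_append]
          simp [h1', h2']
          split_ifs <;> simp
        have hB : pvStepB (segs, cur) c = (segs, cur ++ [c]) := by
          simp [pvStepB, h2']
        simp only [List.foldl_cons, hstate, hB, ih]

-- ===== VERDICT (by name: the statement is the Claim_ definition above) =====
theorem grab_financial_instrument_segments_py_spec : Claim_equal_grab_financial_instrument_segments_py := by
  intro clauses _
  unfold Spec_grab_financial_instrument_segments_py
  unfold grab_financial_instrument_segments_py grab_financial_instrument_segments_py_alt
  have := pv_loop clauses [] []
  simpa [pvGroup] using this
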